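-- pv_equiv track=rewrite | github.com/tkong9/ACSL-Sr | Problems/Chess_Queen_3.py | calculate_safe_spots
-- ===== SOURCE A (Python) =====
-- def calculate_safe_spots(n, m, positions):
--     board = [[True for _ in range(m)] for _ in range(n)]
--     directions = [(1, 0), (0, 1), (-1, 0), (0, -1), (1, 1), (1, -1), (-1, 1), (-1, -1)]
--
--     for p in range(0, len(positions), 2):
--         row, col = positions[p], positions[p + 1]
--         for dx, dy in directions:
--             for i in range(1, max(n, m)):
--                 new_row, new_col = row + dx * i, col + dy * i
--                 if 0 <= new_row < n and 0 <= new_col < m: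
--                     board[new_row][new_col] = False
--
--     for p in range(0, len(positions), 2):
--         row, col = positions[p], positions[p + 1]
--         board[row][col] = False
--
--     safe_spots = sum(sum(row) for row in board)
--
--     return safe_spots
-- ===== SOURCE B (Python) =====
-- def calculate_safe_spots(n, m, positions):
--     rows = [False] * n
--     cols = [False] * m
--     diags = [False] * (n + m - 1)   # indexed by r - c (negative indices count from the end)
--     antis = [False] * (n + m - 1)   # indexed by r + c
--     for p in range(0, len(positions), 2):
--         row, col = positions[p], positions[p + 1]
--         rows[row] = True
--         cols[col] = True
--         diags[row - col] = True
--         antis[row + col] = True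
--     return sum(1 for r in range(n) for c in range(m)
--                if not (rows[r] or cols[c] or diags[r - c] or antis[r + c]))
-- ===== Notes on version B (the rewrite author's own statement) =====
-- stated objective: faster
-- what changed: A materialises an n-by-m boolean board and, for every queen, walks rays of length max(n,m) in eight directions marking attacked cells; B never builds a board: it marks each queen's row, column, diagonal (r-c) and anti-diagonal (r+c) in four one-dimensional flag arrays in one pass over the queens and counts safe cells with four array lookups per cell, O(n*m + Q) instead of O(n*m + Q*max(n,m)).
-- outside the precondition, e.g. on calculate_safe_spots(4, 4, [-2, 1]): A returns 12, B returns 7; on calculate_safe_spots(2, 2, [-1, 0]): A returns 1, B returns 0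
import Mathlib
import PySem

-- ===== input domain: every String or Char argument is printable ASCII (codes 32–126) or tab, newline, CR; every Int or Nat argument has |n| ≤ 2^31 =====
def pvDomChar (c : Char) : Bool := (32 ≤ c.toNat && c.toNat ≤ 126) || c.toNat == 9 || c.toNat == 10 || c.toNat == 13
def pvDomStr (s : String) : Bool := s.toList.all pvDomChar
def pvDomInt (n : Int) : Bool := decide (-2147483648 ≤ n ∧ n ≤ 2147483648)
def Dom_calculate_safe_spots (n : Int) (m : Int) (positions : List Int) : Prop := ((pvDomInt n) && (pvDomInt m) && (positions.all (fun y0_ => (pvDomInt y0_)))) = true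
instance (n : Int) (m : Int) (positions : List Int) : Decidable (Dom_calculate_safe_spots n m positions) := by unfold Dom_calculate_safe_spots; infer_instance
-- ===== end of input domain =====

-- B replaces A's eight-direction ray marking on a materialised n×m board by four attack
-- sets (rows, columns, diagonals, anti-diagonals) built in one pass over the queens and a
-- single membership sweep over the cells: O(n·m + Q) instead of O(n·m + Q·max(n,m)).

-- ===== PORT A =====
-- board[row][col] = v : exact for -len ≤ index < len (the IndexError cases are outside Pre_)
def pvSetCell (board : List (List Bool)) (r c : Int) (v : Bool) : List (List Bool) :=
  PySem.List.pySetD board r (PySem.List.pySetD (PySem.List.pyGetD board r []) c v)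

def pvDirections : List (Int × Int) :=
  [(1,0), (0,1), (-1,0), (0,-1), (1,1), (1,-1), (-1,1), (-1,-1)]

def calculate_safe_spots (n : Int) (m : Int) (positions : List Int) : Int :=
  let board0 := (PySem.List.pyRange 0 n 1).map (fun _ => (PySem.List.pyRange 0 m 1).map (fun _ => true))
  -- positions[p], positions[p+1]: exact, Pre_ gives even length so p and p+1 are in range
  let board1 := (PySem.List.pyRange 0 (PySem.List.len positions) 2).foldl (fun board p =>
    let row := PySem.List.pyGetD positions p 0
    let col := PySem.List.pyGetD positions (p + 1) 0
    pvDirections.foldl (fun board dxy =>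
      (PySem.List.pyRange 1 (max n m) 1).foldl (fun board i =>
        let new_row := row + dxy.1 * i
        let new_col := col + dxy.2 * i
        if 0 ≤ new_row ∧ new_row < n ∧ 0 ≤ new_col ∧ new_col < m then
          pvSetCell board new_row new_col false
        else board) board) board) board0
  let board2 := (PySem.List.pyRange 0 (PySem.List.len positions) 2).foldl (fun board p =>
    let row := PySem.List.pyGetD positions p 0
    let col := PySem.List.pyGetD positions (p + 1) 0
    pvSetCell board row col false) board1
  -- sum(sum(row) for row in board): Python sums booleans as 0/1 integers
  (board2.map (fun row => (row.map (fun b => if b then (1 : Int) else 0)).sum)).sum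

-- ===== PORT B =====
def calculate_safe_spots_alt (n : Int) (m : Int) (positions : List Int) : Int :=
  let rows := PySem.List.pyRepeat [false] n
  let cols := PySem.List.pyRepeat [false] m
  let diags := PySem.List.pyRepeat [false] (n + m - 1)
  let antis := PySem.List.pyRepeat [false] (n + m - 1)
  -- array writes/reads: exact Python indexing (negative indices count from the end; the
  -- IndexError cases are outside Pre_)
  let st := (PySem.List.pyRange 0 (PySem.List.len positions) 2).foldl (fun s p =>
      let row := PySem.List.pyGetD positions p 0
      let col := PySem.List.pyGetD positions (p + 1) 0
      (PySem.List.pySetD s.1 row true, (PySem.List.pySetD s.2.1 col true,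
        (PySem.List.pySetD s.2.2.1 (row - col) true, PySem.List.pySetD s.2.2.2 (row + col) true))))
    (rows, (cols, (diags, antis)))
  (PySem.List.pyRange 0 n 1).foldl (fun acc r =>
    (PySem.List.pyRange 0 m 1).foldl (fun acc c =>
      if !(PySem.List.pyGetD st.1 r false || PySem.List.pyGetD st.2.1 c false ||
           PySem.List.pyGetD st.2.2.1 (r - c) false || PySem.List.pyGetD st.2.2.2 (r + c) false)
      then acc + 1 else acc) acc) 0

-- ===== PRECONDITION & SPEC =====
-- the queen list, two coordinates at a time (shape only; no port logic)
def pvPairs : List Int → List (Int × Int)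
  | a :: b :: t => (a, b) :: pvPairs t
  | _ => []

-- Pre_ restricts to the task's natural domain: an even-length position list (odd length makes
-- both programs raise IndexError at positions[p+1]) whose queens all lie on the board.  A
-- coordinate ≥ n/m (or < -n/-m) raises IndexError in both programs' final indexing; on a
-- negative still-indexable coordinate (an off-board queen) each program silently wraps a
-- DIFFERENT index by Python negative indexing (A its board cell, B its whole flag line), an
-- accident of either indexing scheme that no caller would specify, so those inputs are excluded.
def Pre_calculate_safe_spots (n : Int) (m : Int) (positions : List Int) : Prop :=
  positions.length % 2 = 0 ∧
    ∀ q ∈ pvPairs positions, 0 ≤ q.1 ∧ q.1 < n ∧ 0 ≤ q.2 ∧ q.2 < m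
instance (n : Int) (m : Int) (positions : List Int) : Decidable (Pre_calculate_safe_spots n m positions) := by
  unfold Pre_calculate_safe_spots; infer_instance

def pvWitness_calculate_safe_spots : Int × Int × List Int := (3, 3, [1, 1])

def Spec_calculate_safe_spots (n : Int) (m : Int) (positions : List Int) (out : Int) : Prop := out = calculate_safe_spots_alt n m positions
instance (n : Int) (m : Int) (positions : List Int) (out : Int) : Decidable (Spec_calculate_safe_spots n m positions out) := by unfold Spec_calculate_safe_spots; infer_instance

-- ===== CLAIM (what is proved, stated in full; the proofs are below) =====
def Claim_equal_calculate_safe_spots : Prop := ∀ (n : Int) (m : Int) (positions : List Int), Dom_calculate_safe_spots n m positions → Pre_calculate_safe_spots n m positions → Spec_calculate_safe_spots n m positions (calculate_safe_spots n m positions)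

-- ===== LEMMAS AND PROOFS =====

def pvGrid (n m : Int) (f : Int → Int → Bool) : List (List Bool) :=
  (PySem.List.pyRange 0 n 1).map (fun r => (PySem.List.pyRange 0 m 1).map (fun c => f r c))

theorem pvGrid_congr (n m : Int) (f g : Int → Int → Bool)
    (h : ∀ r c, 0 ≤ r → r < n → 0 ≤ c → c < m → f r c = g r c) :
    pvGrid n m f = pvGrid n m g := by
  unfold pvGrid
  apply List.map_congr_left
  intro r hr
  rw [PySem.List.mem_pyRange_one] at hr
  apply List.map_congr_left
  intro c hc
  rw [PySem.List.mem_pyRange_one] at hc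
  exact h r c hr.1 hr.2 hc.1 hc.2

theorem pvSet_map_pyRange {α : Type} (N : Int) (g : Int → α) (c : Int) (h0 : 0 ≤ c) (_hcN : c < N) (v : α) :
    PySem.List.pySetD ((PySem.List.pyRange 0 N 1).map g) c v
      = (PySem.List.pyRange 0 N 1).map (fun j => if j = c then v else g j) := by
  rw [PySem.List.pySetD_of_nonneg _ v h0]
  rw [PySem.List.pyRange_one]
  simp only [List.map_map]
  apply List.ext_getElem
  · simp
  · intro k h2 h3
    simp only [List.getElem_set, List.getElem_map, List.getElem_range, Function.comp]
    have hk : (k : Int) < N := by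
      simp [List.length_set, List.length_map, List.length_range] at h2
      omega
    split_ifs with ha hb hb
    · rfl
    · exfalso; apply hb; omega
    · exfalso; apply ha; omega
    · rfl

theorem pvGet_pvGrid (n m : Int) (f : Int → Int → Bool) (r : Int) (h0 : 0 ≤ r) (h1 : r < n) :
    PySem.List.pyGetD (pvGrid n m f) r [] = (PySem.List.pyRange 0 m 1).map (fun c => f r c) := by
  unfold pvGrid
  exact PySem.List.pyGetD_map_pyRange_of_nonneg _ n r _ h0 h1

theorem pvGrid_set (n m r c : Int) (f : Int → Int → Bool) (v : Bool)
    (hr0 : 0 ≤ r) (hrn : r < n) (hc0 : 0 ≤ c) (hcm : c < m) :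
    pvSetCell (pvGrid n m f) r c v
      = pvGrid n m (fun r' c' => if r' = r ∧ c' = c then v else f r' c') := by
  unfold pvSetCell
  rw [pvGet_pvGrid n m f r hr0 hrn]
  rw [pvSet_map_pyRange m _ c hc0 hcm]
  show PySem.List.pySetD ((PySem.List.pyRange 0 n 1).map _) r _ = _
  rw [pvSet_map_pyRange n _ r hr0 hrn]
  unfold pvGrid
  apply List.map_congr_left
  intro j hj
  split_ifs with h
  · subst h
    apply List.map_congr_left
    intro c' hc'
    by_cases h2 : c' = c <;> simp [h2]
  · apply List.map_congr_left
    intro c' hc'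
    have : ¬ (j = r ∧ c' = c) := fun hh => h hh.1
    simp [this]

theorem pvFoldSet {β : Type} (n m : Int) (L : List β) (P : β → Prop) [DecidablePred P]
    (pr pc : β → Int)
    (hP : ∀ x, P x → 0 ≤ pr x ∧ pr x < n ∧ 0 ≤ pc x ∧ pc x < m) :
    ∀ f : Int → Int → Bool,
      L.foldl (fun bd x => if P x then pvSetCell bd (pr x) (pc x) false else bd) (pvGrid n m f)
        = pvGrid n m (fun r c => f r c && !(L.any (fun x => decide (P x ∧ r = pr x ∧ c = pc x)))) := by
  induction L with
  | nil => intro f; simp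
  | cons x L ih =>
    intro f
    simp only [List.foldl_cons, List.any_cons]
    by_cases hx : P x
    · rw [if_pos hx]
      obtain ⟨h1, h2, h3, h4⟩ := hP x hx
      rw [pvGrid_set n m (pr x) (pc x) f false h1 h2 h3 h4]
      rw [ih]
      apply pvGrid_congr
      intro r c _ _ _ _
      by_cases hrc : r = pr x ∧ c = pc x
      · simp [hrc, hx]
      · simp only [if_neg hrc]
        have : ¬ (P x ∧ r = pr x ∧ c = pc x) := fun h => hrc h.2
        simp [this]
    · rw [if_neg hx]
      rw [ih]
      apply pvGrid_congr
      intro r c _ _ _ _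
      have : ¬ (P x ∧ r = pr x ∧ c = pc x) := fun h => hx h.1
      simp [this]

theorem pvFoldSetAll (n m : Int) (L : List (Int × Int))
    (hL : ∀ q ∈ L, 0 ≤ q.1 ∧ q.1 < n ∧ 0 ≤ q.2 ∧ q.2 < m) :
    ∀ f : Int → Int → Bool,
      L.foldl (fun bd q => pvSetCell bd q.1 q.2 false) (pvGrid n m f)
        = pvGrid n m (fun r c => f r c && !(L.any (fun q => decide (r = q.1 ∧ c = q.2)))) := by
  induction L with
  | nil => intro f; simp
  | cons x L ih =>
    intro f
    simp only [List.foldl_cons, List.any_cons]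
    obtain ⟨h1, h2, h3, h4⟩ := hL x (by simp)
    rw [pvGrid_set n m x.1 x.2 f false h1 h2 h3 h4]
    rw [ih (fun q hq => hL q (List.mem_cons_of_mem _ hq))]
    apply pvGrid_congr
    intro r c _ _ _ _
    by_cases hrc : r = x.1 ∧ c = x.2
    · simp [hrc]
    · simp [hrc]

def pvHit (n m qr qc r c : Int) : Bool :=
  pvDirections.any (fun d => (PySem.List.pyRange 1 (max n m) 1).any (fun i =>
    decide ((0 ≤ qr + d.1 * i ∧ qr + d.1 * i < n ∧ 0 ≤ qc + d.2 * i ∧ qc + d.2 * i < m)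
      ∧ r = qr + d.1 * i ∧ c = qc + d.2 * i)))

theorem pvDirLoop (n m qr qc : Int) (ds : List (Int × Int)) :
    ∀ f : Int → Int → Bool,
      ds.foldl (fun bd dxy =>
          (PySem.List.pyRange 1 (max n m) 1).foldl (fun bd i =>
            if 0 ≤ qr + dxy.1 * i ∧ qr + dxy.1 * i < n ∧ 0 ≤ qc + dxy.2 * i ∧ qc + dxy.2 * i < m then
              pvSetCell bd (qr + dxy.1 * i) (qc + dxy.2 * i) false
            else bd) bd) (pvGrid n m f)
        = pvGrid n m (fun r c => f r c && !(ds.any (fun d =>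
            (PySem.List.pyRange 1 (max n m) 1).any (fun i =>
              decide ((0 ≤ qr + d.1 * i ∧ qr + d.1 * i < n ∧ 0 ≤ qc + d.2 * i ∧ qc + d.2 * i < m)
                ∧ r = qr + d.1 * i ∧ c = qc + d.2 * i))))) := by
  induction ds with
  | nil => intro f; simp
  | cons d ds ih =>
    intro f
    simp only [List.foldl_cons, List.any_cons]
    rw [pvFoldSet n m (PySem.List.pyRange 1 (max n m) 1)
      (fun i => 0 ≤ qr + d.1 * i ∧ qr + d.1 * i < n ∧ 0 ≤ qc + d.2 * i ∧ qc + d.2 * i < m)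
      (fun i => qr + d.1 * i) (fun i => qc + d.2 * i) (fun i h => ⟨h.1, h.2.1, h.2.2.1, h.2.2.2⟩) f]
    rw [ih]
    apply pvGrid_congr
    intro r c _ _ _ _
    simp [Bool.and_assoc, and_assoc]

theorem pvRayLoop (n m : Int) (P : List (Int × Int)) :
    ∀ f : Int → Int → Bool,
      P.foldl (fun bd q =>
          pvDirections.foldl (fun bd dxy =>
            (PySem.List.pyRange 1 (max n m) 1).foldl (fun bd i =>
              if 0 ≤ q.1 + dxy.1 * i ∧ q.1 + dxy.1 * i < n ∧ 0 ≤ q.2 + dxy.2 * i ∧ q.2 + dxy.2 * i < m then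
                pvSetCell bd (q.1 + dxy.1 * i) (q.2 + dxy.2 * i) false
              else bd) bd) bd) (pvGrid n m f)
        = pvGrid n m (fun r c => f r c && !(P.any (fun q => pvHit n m q.1 q.2 r c))) := by
  induction P with
  | nil => intro f; simp
  | cons q P ih =>
    intro f
    simp only [List.foldl_cons, List.any_cons]
    rw [pvDirLoop n m q.1 q.2 pvDirections f]
    rw [ih]
    apply pvGrid_congr
    intro r c _ _ _ _
    simp [pvHit, Bool.and_assoc]

theorem pvRangeShift (L : Nat) :
    PySem.List.pyRange 0 ((L : Int) + 2) 2
      = 0 :: (PySem.List.pyRange 0 (L : Int) 2).map (fun p => p + 2) := by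
  rcases Nat.eq_zero_or_pos L with h | h
  · subst h; decide
  · rw [PySem.List.pyRange_of_pos 0 ((L : Int) + 2) (by norm_num),
        PySem.List.pyRange_of_pos 0 (L : Int) (by norm_num)]
    have h1 : 0 < (L : Int) + 2 := by omega
    have h2 : 0 < (L : Int) := by omega
    rw [if_pos (by omega : (0:Int) < (L : Int) + 2), if_pos (by omega : (0:Int) < (L : Int))]
    have h3 : (((L : Int) + 2 - 0 + 2 - 1) / 2).toNat = (((L : Int) - 0 + 2 - 1) / 2).toNat + 1 := by
      omega
    rw [h3, List.range_succ_eq_map]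
    simp only [List.map_cons, List.map_map]
    refine List.cons_eq_cons.mpr ⟨by norm_num, ?_⟩
    apply List.map_congr_left
    intro k _
    simp only [Function.comp, Nat.succ_eq_add_one]
    push_cast
    ring

theorem pvGetShift {α : Type} (a b : α) (t : List α) (p : Int) (d : α) (hp : 0 ≤ p) :
    PySem.List.pyGetD (a :: b :: t) (p + 2) d = PySem.List.pyGetD t p d := by
  obtain ⟨k, rfl⟩ : ∃ k : Nat, p = (k : Int) := ⟨p.toNat, by omega⟩
  have : (k : Int) + 2 = ((k + 2 : Nat) : Int) := by push_cast; ring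
  rw [this, PySem.List.pyGetD_natCast, PySem.List.pyGetD_natCast]
  rfl

theorem pvStep2Fold {σ : Type} (f : σ → Int → Int → σ) :
    ∀ (xs : List Int), xs.length % 2 = 0 → ∀ (init : σ),
      (PySem.List.pyRange 0 (xs.length : Int) 2).foldl
          (fun s p => f s (PySem.List.pyGetD xs p 0) (PySem.List.pyGetD xs (p + 1) 0)) init
        = (pvPairs xs).foldl (fun s q => f s q.1 q.2) init := by
  intro xs
  induction xs using pvPairs.induct with
  | case1 a b t ih =>
    intro hlen init
    have hlen' : t.length % 2 = 0 := by simp at hlen; omega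
    have : ((a :: b :: t).length : Int) = (t.length : Int) + 2 := by simp; ring
    rw [this, pvRangeShift t.length]
    simp only [List.foldl_cons, List.foldl_map]
    have e0 : PySem.List.pyGetD (a :: b :: t) 0 0 = a := PySem.List.pyGetD_zero_cons a _ 0
    have e1 : PySem.List.pyGetD (a :: b :: t) (0 + 1) 0 = b := by
      norm_num
      have : (1 : Int) = ((1 : Nat) : Int) := rfl
      rw [this, PySem.List.pyGetD_natCast]
      rfl
    rw [e0, e1]
    rw [PySem.List.foldl_congr_mem _ _
      (fun s p => f s (PySem.List.pyGetD t p 0) (PySem.List.pyGetD t (p + 1) 0)) _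
      (by
        intro acc p hp
        have h0 : 0 ≤ p := by
          have := (PySem.List.mem_pyRange_iff_of_pos (by norm_num : (0:Int) < 2) p).mp hp
          omega
        rw [pvGetShift a b t p 0 h0]
        have : p + 2 + 1 = (p + 1) + 2 := by ring
        rw [this, pvGetShift a b t (p + 1) 0 (by omega)])]
    rw [ih hlen']
    rfl
  | case2 x hx =>
    intro hlen init
    cases x with
    | nil => rfl
    | cons a t =>
      cases t with
      | nil => simp at hlen
      | cons b t' => exact absurd rfl (hx a b t')

theorem pvQueenIff (n m qr qc r c : Int)
    (hq : 0 ≤ qr ∧ qr < n ∧ 0 ≤ qc ∧ qc < m)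
    (hr0 : 0 ≤ r) (hrn : r < n) (hc0 : 0 ≤ c) (hcm : m > c) :
    (pvHit n m qr qc r c = true ∨ (r = qr ∧ c = qc))
      ↔ (r = qr ∨ c = qc ∨ r - c = qr - qc ∨ r + c = qr + qc) := by
  have hnm : n ≤ max n m := le_max_left n m
  have hmm : m ≤ max n m := le_max_right n m
  simp only [pvHit, pvDirections, List.any_cons, List.any_nil, Bool.or_false,
    Bool.or_eq_true, List.any_eq_true, PySem.List.mem_pyRange_one, decide_eq_true_eq]
  constructor
  · rintro (h | h)
    · rcases h with (⟨i,hi,hb⟩|⟨i,hi,hb⟩|⟨i,hi,hb⟩|⟨i,hi,hb⟩|⟨i,hi,hb⟩|⟨i,hi,hb⟩|⟨i,hi,hb⟩|⟨i,hi,hb⟩) <;>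
        omega
    · omega
  · intro h
    by_cases hcell : r = qr ∧ c = qc
    · exact Or.inr hcell
    · left
      rcases h with h | h | h | h
      · -- same row, c ≠ qc
        by_cases hcc : qc < c
        · exact Or.inr (Or.inl ⟨c - qc, by omega, by omega⟩)
        · refine Or.inr (Or.inr (Or.inr (Or.inl ⟨qc - c, by omega, by omega⟩)))
      · by_cases hrr : qr < r
        · exact Or.inl ⟨r - qr, by omega, by omega⟩
        · refine Or.inr (Or.inr (Or.inl ⟨qr - r, by omega, by omega⟩))
      · by_cases hrr : qr < r
        · refine Or.inr (Or.inr (Or.inr (Or.inr (Or.inl ⟨r - qr, by omega, by omega⟩))))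
        · refine Or.inr (Or.inr (Or.inr (Or.inr (Or.inr (Or.inr (Or.inr ⟨qr - r, by omega, by omega⟩))))))
      · by_cases hrr : qr < r
        · refine Or.inr (Or.inr (Or.inr (Or.inr (Or.inr (Or.inl ⟨r - qr, by omega, by omega⟩)))))
        · refine Or.inr (Or.inr (Or.inr (Or.inr (Or.inr (Or.inr (Or.inl ⟨qr - r, by omega, by omega⟩))))))

theorem pvCellIff (n m : Int) (P : List (Int × Int))
    (hP : ∀ q ∈ P, 0 ≤ q.1 ∧ q.1 < n ∧ 0 ≤ q.2 ∧ q.2 < m)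
    (r c : Int) (hr0 : 0 ≤ r) (hrn : r < n) (hc0 : 0 ≤ c) (hcm : c < m) :
    ((¬ ∃ q ∈ P, pvHit n m q.1 q.2 r c = true) ∧ ¬ ∃ q ∈ P, r = q.1 ∧ c = q.2)
      ↔ ((¬ ∃ q ∈ P, r = q.1) ∧ (¬ ∃ q ∈ P, c = q.2) ∧
         (¬ ∃ q ∈ P, r - c = q.1 - q.2) ∧ (¬ ∃ q ∈ P, r + c = q.1 + q.2)) := by
  have key : ∀ q ∈ P, ((pvHit n m q.1 q.2 r c = true ∨ (r = q.1 ∧ c = q.2))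
      ↔ (r = q.1 ∨ c = q.2 ∨ r - c = q.1 - q.2 ∨ r + c = q.1 + q.2)) := fun q hq =>
    pvQueenIff n m q.1 q.2 r c (hP q hq) hr0 hrn hc0 hcm
  constructor
  · rintro ⟨h1, h2⟩
    refine ⟨?_, ?_, ?_, ?_⟩ <;> rintro ⟨q, hq, he⟩ <;>
      rcases (key q hq).mpr (by tauto) with hh | hh
    all_goals first
      | exact h1 ⟨q, hq, hh⟩
      | exact h2 ⟨q, hq, hh⟩
  · rintro ⟨ha, hb, hc', hd⟩
    constructor
    · rintro ⟨q, hq, hh⟩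
      rcases (key q hq).mp (Or.inl hh) with h | h | h | h
      · exact ha ⟨q, hq, h⟩
      · exact hb ⟨q, hq, h⟩
      · exact hc' ⟨q, hq, h⟩
      · exact hd ⟨q, hq, h⟩
    · rintro ⟨q, hq, hh⟩
      rcases (key q hq).mp (Or.inr hh) with h | h | h | h
      · exact ha ⟨q, hq, h⟩
      · exact hb ⟨q, hq, h⟩
      · exact hc' ⟨q, hq, h⟩
      · exact hd ⟨q, hq, h⟩

theorem pvA_eq (n m : Int) (positions : List Int)
    (heven : positions.length % 2 = 0)
    (hP : ∀ q ∈ pvPairs positions, 0 ≤ q.1 ∧ q.1 < n ∧ 0 ≤ q.2 ∧ q.2 < m) :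
    calculate_safe_spots n m positions
      = ((PySem.List.pyRange 0 n 1).map (fun r =>
          ((PySem.List.pyRange 0 m 1).map (fun c =>
            if (!((pvPairs positions).any (fun q => pvHit n m q.1 q.2 r c))
                && !((pvPairs positions).any (fun q => decide (r = q.1 ∧ c = q.2)))) then (1 : Int)
            else 0)).sum)).sum := by
  show (List.map (fun row => (List.map (fun b => if b then (1 : Int) else 0) row).sum)
      (List.foldl (fun board p =>
        pvSetCell board (PySem.List.pyGetD positions p 0) (PySem.List.pyGetD positions (p + 1) 0) false)
        (List.foldl (fun board p =>
          pvDirections.foldl (fun board dxy =>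
            (PySem.List.pyRange 1 (max n m) 1).foldl (fun board i =>
              if 0 ≤ PySem.List.pyGetD positions p 0 + dxy.1 * i ∧
                 PySem.List.pyGetD positions p 0 + dxy.1 * i < n ∧
                 0 ≤ PySem.List.pyGetD positions (p + 1) 0 + dxy.2 * i ∧
                 PySem.List.pyGetD positions (p + 1) 0 + dxy.2 * i < m then
                pvSetCell board (PySem.List.pyGetD positions p 0 + dxy.1 * i)
                  (PySem.List.pyGetD positions (p + 1) 0 + dxy.2 * i) false
              else board) board) board)
          (pvGrid n m (fun _ _ => true))
          (PySem.List.pyRange 0 ((positions.length : Nat) : Int) 2))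
        (PySem.List.pyRange 0 ((positions.length : Nat) : Int) 2))).sum = _
  rw [pvStep2Fold (fun bd row col =>
      pvDirections.foldl (fun board dxy =>
        (PySem.List.pyRange 1 (max n m) 1).foldl (fun board i =>
          if 0 ≤ row + dxy.1 * i ∧ row + dxy.1 * i < n ∧ 0 ≤ col + dxy.2 * i ∧ col + dxy.2 * i < m then
            pvSetCell board (row + dxy.1 * i) (col + dxy.2 * i) false
          else board) board) bd) positions heven]
  rw [pvRayLoop n m (pvPairs positions) (fun _ _ => true)]
  rw [pvStep2Fold (fun bd row col => pvSetCell bd row col false) positions heven]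
  rw [pvFoldSetAll n m (pvPairs positions) hP]
  simp only [pvGrid, List.map_map, Function.comp_def]
  rfl

def pvIdx (N i : Int) : Int := if i < 0 then N + i else i

theorem pvIdx_of_nonneg (N i : Int) (h : 0 ≤ i) : pvIdx N i = i := by
  unfold pvIdx; omega

def pvVec (N : Int) (f : Int → Bool) : List Bool := (PySem.List.pyRange 0 N 1).map f

theorem pvVec_congr (N : Int) (f g : Int → Bool) (h : ∀ j, 0 ≤ j → j < N → f j = g j) :
    pvVec N f = pvVec N g := by
  unfold pvVec
  apply List.map_congr_left
  intro j hj
  rw [PySem.List.mem_pyRange_one] at hj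
  exact h j hj.1 hj.2

theorem pvVecGet (N i : Int) (f : Int → Bool) (d : Bool) (h1 : -N ≤ i) (h2 : i < N) :
    PySem.List.pyGetD (pvVec N f) i d = f (pvIdx N i) := by
  unfold pvVec
  by_cases h0 : 0 ≤ i
  · rw [pvIdx_of_nonneg N i h0]
    exact PySem.List.pyGetD_map_pyRange_of_nonneg f N i d h0 h2
  · have hi : i < 0 := by omega
    have hk : i = -(((-i).toNat : Nat) : Int) := by omega
    have hlen : ((PySem.List.pyRange 0 N 1).map f).length = N.toNat := by
      simp [PySem.List.length_pyRange_one]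
    rw [hk, PySem.List.pyGetD_neg_natCast _ _ _ (by omega) (by rw [hlen]; omega)]
    rw [List.getElem_map, PySem.List.getElem_pyRange_one]
    congr 1
    unfold pvIdx
    rw [hlen]
    split_ifs <;> omega

theorem pvSet_map_pyRange_nat (N : Int) (g : Int → Bool) (p : Nat) (_hp : (p : Int) < N) (v : Bool) :
    ((PySem.List.pyRange 0 N 1).map g).set p v
      = (PySem.List.pyRange 0 N 1).map (fun j => if j = (p : Int) then v else g j) := by
  rw [PySem.List.pyRange_one]
  simp only [List.map_map]
  apply List.ext_getElem
  · simp
  · intro k h2 h3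
    simp only [List.getElem_set, List.getElem_map, List.getElem_range, Function.comp]
    split_ifs with ha hb hb
    · rfl
    · exfalso; apply hb; omega
    · exfalso; apply ha; omega
    · rfl

theorem pvVecSet (N i : Int) (f : Int → Bool) (v : Bool) (h1 : -N ≤ i) (h2 : i < N) :
    PySem.List.pySetD (pvVec N f) i v = pvVec N (fun j => if j = pvIdx N i then v else f j) := by
  have hstep : PySem.List.pySetD (pvVec N f) i v = (pvVec N f).set (pvIdx N i).toNat v := by
    by_cases h0 : 0 ≤ i
    · rw [PySem.List.pySetD_of_nonneg _ v h0, pvIdx_of_nonneg N i h0]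
    · have hlen : (pvVec N f).length = N.toNat := by
        simp [pvVec, PySem.List.length_pyRange_one]
      simp only [PySem.List.pySetD, PySem.List.pySet?, PySem.List.pyIdx?, hlen]
      rw [if_neg h0, if_pos (by omega : -((N.toNat : Nat) : Int) ≤ i)]
      unfold pvIdx
      rw [if_pos (by omega : i < 0)]
      simp only [Option.map_some, Option.getD_some]
      congr 1
      omega
  rw [hstep]
  unfold pvVec
  rw [pvSet_map_pyRange_nat N f (pvIdx N i).toNat (by unfold pvIdx; split_ifs <;> omega) v]
  apply List.map_congr_left
  intro j hj
  rw [PySem.List.mem_pyRange_one] at hj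
  have : ((pvIdx N i).toNat : Int) = pvIdx N i := by unfold pvIdx; split_ifs <;> omega
  rw [this]

theorem pvVecFold (N : Int) (L : List (Int × Int)) (key : Int × Int → Int)
    (hk : ∀ q ∈ L, -N ≤ key q ∧ key q < N) :
    ∀ f : Int → Bool,
      L.foldl (fun a q => PySem.List.pySetD a (key q) true) (pvVec N f)
        = pvVec N (fun j => f j || L.any (fun q => decide (j = pvIdx N (key q)))) := by
  induction L with
  | nil => intro f; simp
  | cons q L ih =>
    intro f
    simp only [List.foldl_cons, List.any_cons]
    obtain ⟨h1, h2⟩ := hk q (by simp)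
    rw [pvVecSet N (key q) f true h1 h2]
    rw [ih (fun x hx => hk x (List.mem_cons_of_mem _ hx))]
    apply pvVec_congr
    intro j _ _
    by_cases hj : j = pvIdx N (key q)
    · simp [hj]
    · simp [hj]

theorem pvIdx_inj_diag (n m a b : Int) (ha1 : 1 - m ≤ a) (ha2 : a ≤ n - 1)
    (hb1 : 1 - m ≤ b) (hb2 : b ≤ n - 1) :
    pvIdx (n + m - 1) a = pvIdx (n + m - 1) b ↔ a = b := by
  unfold pvIdx; split_ifs <;> omega

theorem pvB_eq (n m : Int) (positions : List Int)
    (heven : positions.length % 2 = 0)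
    (hP : ∀ q ∈ pvPairs positions, 0 ≤ q.1 ∧ q.1 < n ∧ 0 ≤ q.2 ∧ q.2 < m) :
    calculate_safe_spots_alt n m positions
      = ((PySem.List.pyRange 0 n 1).map (fun r =>
          ((PySem.List.pyRange 0 m 1).map (fun c =>
            if decide ((¬ ∃ q ∈ pvPairs positions, r = q.1) ∧ (¬ ∃ q ∈ pvPairs positions, c = q.2) ∧
                (¬ ∃ q ∈ pvPairs positions, r - c = q.1 - q.2) ∧
                (¬ ∃ q ∈ pvPairs positions, r + c = q.1 + q.2)) then (1 : Int)
            else 0)).sum)).sum := by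
  have hrep : ∀ N : Int, PySem.List.pyRepeat [false] N = pvVec N (fun _ => false) := by
    intro N
    rw [PySem.List.pyRepeat_singleton]
    unfold pvVec
    symm
    rw [List.eq_replicate_iff]
    constructor
    · simp [PySem.List.length_pyRange_one]
    · intro b hb
      simp only [List.mem_map] at hb
      obtain ⟨_, _, rfl⟩ := hb
      rfl
  simp only [calculate_safe_spots_alt, PySem.List.len_eq, hrep]
  simp only [pvStep2Fold (fun s row col =>
      (PySem.List.pySetD s.1 row true, (PySem.List.pySetD s.2.1 col true,
        (PySem.List.pySetD s.2.2.1 (row - col) true, PySem.List.pySetD s.2.2.2 (row + col) true))))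
    positions heven]
  rw [PySem.List.foldl_prod_mk (f := fun s (q : Int × Int) => PySem.List.pySetD s q.1 true)
      (g := fun s (q : Int × Int) => (PySem.List.pySetD s.1 q.2 true,
        (PySem.List.pySetD s.2.1 (q.1 - q.2) true, PySem.List.pySetD s.2.2 (q.1 + q.2) true)))]
  rw [PySem.List.foldl_prod_mk (f := fun s (q : Int × Int) => PySem.List.pySetD s q.2 true)
      (g := fun s (q : Int × Int) => (PySem.List.pySetD s.1 (q.1 - q.2) true,
        PySem.List.pySetD s.2 (q.1 + q.2) true))]
  rw [PySem.List.foldl_prod_mk (f := fun s (q : Int × Int) => PySem.List.pySetD s (q.1 - q.2) true)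
      (g := fun s (q : Int × Int) => PySem.List.pySetD s (q.1 + q.2) true)]
  rw [pvVecFold n (pvPairs positions) (fun q => q.1)
      (fun q hq => by have := hP q hq; simp only []; omega)]
  rw [pvVecFold m (pvPairs positions) (fun q => q.2)
      (fun q hq => by have := hP q hq; simp only []; omega)]
  rw [pvVecFold (n + m - 1) (pvPairs positions) (fun q => q.1 - q.2)
      (fun q hq => by have := hP q hq; simp only []; omega)]
  rw [pvVecFold (n + m - 1) (pvPairs positions) (fun q => q.1 + q.2)
      (fun q hq => by have := hP q hq; simp only []; omega)]
  simp only [PySem.List.foldl_if_add_one, PySem.List.foldl_add, zero_add,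
    PySem.List.sum_map_ite_one_zero]
  apply congrArg
  apply List.map_congr_left
  intro r hr
  rw [PySem.List.mem_pyRange_one] at hr
  apply congrArg
  apply List.countP_congr
  intro c hc
  rw [PySem.List.mem_pyRange_one] at hc
  rw [pvVecGet n r _ false (by omega) hr.2]
  rw [pvVecGet m c _ false (by omega) hc.2]
  rw [pvVecGet (n + m - 1) (r - c) _ false (by omega) (by omega)]
  rw [pvVecGet (n + m - 1) (r + c) _ false (by omega) (by omega)]
  simp only [Bool.false_or]
  rw [pvIdx_of_nonneg n r hr.1, pvIdx_of_nonneg m c hc.1,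
    pvIdx_of_nonneg (n + m - 1) (r + c) (by omega)]
  rw [Bool.eq_iff_iff]
  simp only [Bool.not_eq_eq_eq_not, Bool.not_true, Bool.or_eq_false_iff,
    List.any_eq_false, decide_eq_true_eq, iff_true]
  constructor
  · rintro ⟨⟨⟨ha, hb⟩, hd⟩, he⟩
    refine ⟨?_, ?_, ?_, ?_⟩ <;> rintro ⟨q, hq, hh⟩
    · exact ha q hq (by rw [pvIdx_of_nonneg n q.1 (hP q hq).1]; exact hh)
    · exact hb q hq (by rw [pvIdx_of_nonneg m q.2 (hP q hq).2.2.1]; exact hh)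
    · exact hd q hq (by rw [hh])
    · exact he q hq (by
        rw [pvIdx_of_nonneg (n + m - 1) (q.1 + q.2) (by have := hP q hq; omega)]
        exact hh)
  · rintro ⟨ha, hb, hd, he⟩
    refine ⟨⟨⟨?_, ?_⟩, ?_⟩, ?_⟩ <;> intro q hq hh
    · exact ha ⟨q, hq, by rw [pvIdx_of_nonneg n q.1 (hP q hq).1] at hh; exact hh⟩
    · exact hb ⟨q, hq, by rw [pvIdx_of_nonneg m q.2 (hP q hq).2.2.1] at hh; exact hh⟩
    · refine hd ⟨q, hq, ?_⟩
      have h4 := hP q hq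
      rw [pvIdx_inj_diag n m (r - c) (q.1 - q.2) (by omega) (by omega) (by omega) (by omega)] at hh
      exact hh
    · refine he ⟨q, hq, ?_⟩
      rw [pvIdx_of_nonneg (n + m - 1) (q.1 + q.2) (by have := hP q hq; omega)] at hh
      exact hh

theorem pvMain (n m : Int) (positions : List Int)
    (heven : positions.length % 2 = 0)
    (hP : ∀ q ∈ pvPairs positions, 0 ≤ q.1 ∧ q.1 < n ∧ 0 ≤ q.2 ∧ q.2 < m) :
    calculate_safe_spots n m positions = calculate_safe_spots_alt n m positions := by
  rw [pvA_eq n m positions heven hP, pvB_eq n m positions heven hP]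
  apply congrArg
  apply List.map_congr_left
  intro r hr
  rw [PySem.List.mem_pyRange_one] at hr
  apply congrArg
  apply List.map_congr_left
  intro c hc
  rw [PySem.List.mem_pyRange_one] at hc
  refine if_congr ?_ rfl rfl
  rw [decide_eq_true_eq, Bool.and_eq_true, Bool.not_eq_true', Bool.not_eq_true',
    Bool.eq_false_iff, Bool.eq_false_iff]
  simp only [ne_eq, List.any_eq_true, decide_eq_true_eq]
  exact pvCellIff n m (pvPairs positions) hP r c hr.1 hr.2 hc.1 hc.2

-- ===== VERDICT (by name: the statement is the Claim_ definition above) =====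
theorem calculate_safe_spots_spec : Claim_equal_calculate_safe_spots := by
  intro n m positions _ hPre
  unfold Spec_calculate_safe_spots
  exact pvMain n m positions hPre.1 hPre.2
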